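-- pv_equiv track=rewrite | github.com/featheru/BlackBoxTesting | testWriterHelp.py | getTestCaseDigits
-- ===== SOURCE A (Python) =====
-- def getTestCaseDigits(line):
--     newStr = ""
--     for letter in line:
--         if letter.isdigit():
--             newStr += letter
--         elif letter == "K":
--             return newStr
--     return newStr
-- ===== SOURCE B (Python) =====
-- def getTestCaseDigits(line):
--     idx = line.find('K')
--     if idx == -1:
--         idx = len(line)
--     return ''.join(c for c in line[:idx] if c.isdigit())
-- ===== Notes on version B (the rewrite author's own statement) =====
-- stated objective: simpler
-- what changed: B replaces A's fused filter-and-early-return loop by two separate passes: locate the first 'K' with str.find (mapping -1 to len), slice the prefix, then filter digits with a join over a comprehension.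
import Mathlib
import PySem

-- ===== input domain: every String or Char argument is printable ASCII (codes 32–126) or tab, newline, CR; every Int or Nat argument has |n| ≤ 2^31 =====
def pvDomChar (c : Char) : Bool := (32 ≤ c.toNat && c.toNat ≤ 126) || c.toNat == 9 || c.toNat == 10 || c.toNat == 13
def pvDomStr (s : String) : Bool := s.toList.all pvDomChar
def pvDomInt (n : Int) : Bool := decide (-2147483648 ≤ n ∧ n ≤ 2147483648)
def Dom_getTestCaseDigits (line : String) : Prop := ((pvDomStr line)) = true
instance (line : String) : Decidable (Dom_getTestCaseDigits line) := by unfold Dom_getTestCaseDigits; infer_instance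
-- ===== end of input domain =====

-- B locates the first 'K' with find, slices the prefix and filters digits in a separate pass (simpler decomposition); A fuses filtering and the 'K' test in one loop with an early return.

-- ===== PORT A =====
-- A's single loop: accumulate digits (string concat ported over code points), early return on 'K'.
def goA : List Char → List Char → List Char
  | acc, [] => acc
  | acc, c :: rest =>
    if PySem.Chars.isdigit c then goA (acc ++ [c]) rest
    else if c = 'K' then acc
    else goA acc rest

def getTestCaseDigits (line : String) : String :=
  String.ofList (goA [] line.toList)

-- ===== PORT B =====
-- idx = line.find('K'); if -1 then len(line); ''.join(c for c in line[:idx] if c.isdigit())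
def getTestCaseDigits_alt (line : String) : String :=
  let idx := PySem.Str.find line "K"
  let idx := if idx = -1 then (line.toList.length : Int) else idx
  String.ofList ((PySem.Str.slice line none (some idx)).toList.filter PySem.Chars.isdigit)

-- ===== PRECONDITION & SPEC =====
def Spec_getTestCaseDigits (line : String) (out : String) : Prop := out = getTestCaseDigits_alt line
instance (line : String) (out : String) : Decidable (Spec_getTestCaseDigits line out) := by unfold Spec_getTestCaseDigits; infer_instance

-- ===== CLAIM (what is proved, stated in full; the proofs are below) =====
def Claim_equal_getTestCaseDigits : Prop := ∀ (line : String), Dom_getTestCaseDigits line → Spec_getTestCaseDigits line (getTestCaseDigits line)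

-- ===== LEMMAS AND PROOFS =====

-- A's loop equals: filter digits over the prefix before the first 'K'.
lemma goA_eq (cs acc : List Char) :
    goA acc cs = acc ++ (cs.takeWhile (fun c => !(c == 'K'))).filter PySem.Chars.isdigit := by
  induction cs generalizing acc with
  | nil => simp [goA]
  | cons c rest ih =>
    by_cases hd : PySem.Chars.isdigit c
    · have hne : c ≠ 'K' := by
        intro h; subst h; exact absurd hd (by decide)
      simp [goA, hd, hne, ih]
    · by_cases hK : c = 'K'
      · subst hK; simp [goA, hd]
      · simp [goA, hd, hK, ih]

lemma take_eq_takeWhile (cs : List Char) (n : Nat)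
    (hn : ['K'] <+: cs.drop n) (hmin : ∀ j, j < n → ¬ ['K'] <+: cs.drop j) :
    cs.take n = cs.takeWhile (fun c => !(c == 'K')) := by
  induction cs generalizing n with
  | nil => simp at hn
  | cons c rest ih =>
    cases n with
    | zero =>
      simp only [List.drop] at hn
      obtain ⟨t, ht⟩ := hn
      simp at ht
      simp [ht.1.symm]
    | succ m =>
      have hc : c ≠ 'K' := by
        intro h
        exact hmin 0 (Nat.succ_pos m) ⟨rest, by simp [h]⟩
      have := ih m (by simpa using hn)
        (fun j hj => by simpa using hmin (j + 1) (Nat.succ_lt_succ hj))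
      simp [hc, this]

lemma takeWhile_of_no_K (cs : List Char) (h : 'K' ∉ cs) :
    cs.takeWhile (fun c => !(c == 'K')) = cs := by
  rw [List.takeWhile_eq_self_iff]
  intro x hx
  simp
  intro hxK
  exact h (hxK ▸ hx)

-- ===== VERDICT (by name: the statement is the Claim_ definition above) =====
lemma alt_eq (line : String) :
    getTestCaseDigits_alt line =
      String.ofList ((PySem.Str.slice line none
        (some (if PySem.Str.find line "K" = -1 then (line.toList.length : Int)
               else PySem.Str.find line "K"))).toList.filter PySem.Chars.isdigit) := rfl

theorem getTestCaseDigits_spec : Claim_equal_getTestCaseDigits := by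
  intro line _
  unfold Spec_getTestCaseDigits getTestCaseDigits
  rw [alt_eq]
  by_cases hfind : PySem.Str.find line "K" = -1
  · have hnotin : ¬ ['K'] <:+: line.toList := by
      have := (PySem.Chars.find_eq_neg_one_iff (s := line.toList) (sub := "K".toList))
      simp only [PySem.Str.find_eq] at hfind
      simpa using this.mp hfind
    have hK : 'K' ∉ line.toList := by
      intro hmem
      obtain ⟨s, t, hst⟩ := List.append_of_mem hmem
      exact hnotin ⟨s, t, by simp [hst]⟩
    rw [if_pos hfind, goA_eq, takeWhile_of_no_K _ hK]
    refine congrArg String.ofList ?_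
    simp only [List.nil_append]
    rw [PySem.Str.toList_slice, PySem.Chars.slice_eq_listSlice, PySem.List.slice_to_natCast,
      List.take_length]
  · have hspec := PySem.Chars.findFrom_natCast_spec (s := line.toList) (sub := "K".toList) (k := 0)
      (by simp) (by simpa [PySem.Chars.findFrom_zero] using hfind)
    simp only [Nat.cast_zero, PySem.Chars.findFrom_zero] at hspec
    obtain ⟨hge, hpre, hminI⟩ := hspec
    have hge' : (0:Int) ≤ PySem.Str.find line "K" := by simpa using hge
    have htake : line.toList.take (PySem.Str.find line "K").toNat
        = line.toList.takeWhile (fun c => !(c == 'K')) :=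
      take_eq_takeWhile _ _ (by simpa using hpre)
        (fun j hj h' => hminI j (by omega) (by simpa using hj) (by simpa using h'))
    rw [if_neg hfind, goA_eq, ← htake]
    refine congrArg String.ofList ?_
    simp only [List.nil_append]
    rw [PySem.Str.toList_slice, PySem.Chars.slice_eq_listSlice, PySem.List.slice_to _ _]
    exact hge'
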